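-- pv_equiv track=rewrite | github.com/rosanarezende/freeCodeCamp_Flask.Reddit.Clone | helper_functions.py | salt_password
-- ===== SOURCE A (Python) =====
-- def salt_password(password):
--   #Para cada 2 caracteres, insira 'Buau'
--   iterations = 0
--   password_array = []
--
--   for char in password:
--     iterations += 1
--     password_array.append(char)
--     if iterations % 2 == 0:
--       password_array.append('Buau')
--
--   return ''.join(password_array)
-- ===== SOURCE B (Python) =====
-- def salt_password(password):
--     parts = []
--     i = 0
--     n = len(password)
--     while i < n:
--         chunk = password[i:i+2]
--         parts.append(chunk)
--         if len(chunk) == 2: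
--             parts.append('Buau')
--         i += 2
--     return ''.join(parts)
-- ===== Notes on version B (the rewrite author's own statement) =====
-- stated objective: alternative
-- what changed: Replaces the per-character loop with a modulo-2 counter by a stride-2 pass over two-character slices, appending 'Buau' after each full chunk.
import Mathlib
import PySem

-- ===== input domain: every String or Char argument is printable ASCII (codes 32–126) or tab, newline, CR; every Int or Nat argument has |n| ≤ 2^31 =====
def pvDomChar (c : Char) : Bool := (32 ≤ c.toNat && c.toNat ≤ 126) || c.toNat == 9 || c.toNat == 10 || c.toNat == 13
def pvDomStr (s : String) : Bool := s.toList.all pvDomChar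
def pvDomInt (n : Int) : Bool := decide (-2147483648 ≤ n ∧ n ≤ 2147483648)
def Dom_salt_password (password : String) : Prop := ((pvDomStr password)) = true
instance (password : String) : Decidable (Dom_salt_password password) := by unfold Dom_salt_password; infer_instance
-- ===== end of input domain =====

-- B replaces A's per-character loop with a modulo-2 counter by a stride-2 pass over
-- two-character chunks (objective: alternative decomposition; same output, same cost).

-- ===== PORT A =====
def salt_password (password : String) : String :=
  let st := password.toList.foldl
    (fun (acc : Int × List String) ch =>
      let iterations := acc.1 + 1
      let arr := acc.2 ++ [String.ofList [ch]]
      if PySem.Int.mod iterations 2 = 0 then (iterations, arr ++ ["Buau"])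
      else (iterations, arr))
    (0, [])
  String.join st.2

-- ===== PORT B =====
-- B's while loop consumes the string two characters per step: chunk = password[i:i+2];
-- here that stride is the structural recursion taking two chars (or the final one) at a time.
def saltChunks : List Char → List String
  | [] => []
  | [c] => [String.ofList [c]]
  | c1 :: c2 :: rest => String.ofList [c1, c2] :: "Buau" :: saltChunks rest

def salt_password_alt (password : String) : String :=
  String.join (saltChunks password.toList)

-- ===== PRECONDITION & SPEC =====
def Spec_salt_password (password : String) (out : String) : Prop := out = salt_password_alt password
instance (password : String) (out : String) : Decidable (Spec_salt_password password out) := by unfold Spec_salt_password; infer_instance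

-- ===== CLAIM (what is proved, stated in full; the proofs are below) =====
def Claim_equal_salt_password : Prop := ∀ (password : String), Dom_salt_password password → Spec_salt_password password (salt_password password)

-- ===== LEMMAS AND PROOFS =====
-- String.join distributes over cons and append.
theorem pv_join_fold (l : List String) (s : String) :
    l.foldl (fun r x => r ++ x) s = s ++ String.join l := by
  induction l generalizing s with
  | nil => simp [String.join]
  | cons x xs ih =>
    show List.foldl _ (s ++ x) xs = s ++ String.join (x :: xs)
    rw [ih]
    have hx : String.join (x :: xs) = x ++ String.join xs := by
      show List.foldl _ ("" ++ x) xs = _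
      rw [ih]; simp
    rw [hx, String.append_assoc]

theorem pv_join_nil : String.join ([] : List String) = "" := rfl

theorem pv_join_cons (x : String) (xs : List String) :
    String.join (x :: xs) = x ++ String.join xs := by
  show List.foldl _ ("" ++ x) xs = _
  rw [pv_join_fold]; simp

theorem pv_join_append (a b : List String) :
    String.join (a ++ b) = String.join a ++ String.join b := by
  induction a with
  | nil => simp [pv_join_nil]
  | cons x xs ih => simp [pv_join_cons, ih, String.append_assoc]

theorem salt_foldl_eq (cs : List Char) : ∀ (it : Int) (acc : List String),
    PySem.Int.mod it 2 = 0 →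
    String.join (cs.foldl
      (fun (acc : Int × List String) ch =>
        let iterations := acc.1 + 1
        let arr := acc.2 ++ [String.ofList [ch]]
        if PySem.Int.mod iterations 2 = 0 then (iterations, arr ++ ["Buau"])
        else (iterations, arr))
      (it, acc)).2 = String.join acc ++ String.join (saltChunks cs) := by
  induction cs using saltChunks.induct with
  | case1 => intro it acc _; simp [saltChunks, pv_join_nil]
  | case2 c =>
    intro it acc h
    rw [PySem.Int.mod_eq_zero_iff_dvd] at h
    have h1 : ¬ (2 ∣ it + 1) := by omega
    simp [List.foldl, h1, saltChunks, pv_join_append]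
  | case3 c1 c2 rest ih =>
    intro it acc h
    rw [PySem.Int.mod_eq_zero_iff_dvd] at h
    have h1 : ¬ PySem.Int.mod (it + 1) 2 = 0 := by
      rw [PySem.Int.mod_eq_zero_iff_dvd]; omega
    have h2 : PySem.Int.mod (it + 1 + 1) 2 = 0 := by
      rw [PySem.Int.mod_eq_zero_iff_dvd]; omega
    simp only [List.foldl, if_neg h1]
    simp only [if_pos h2]
    rw [ih (it + 1 + 1) _ h2]
    simp [saltChunks, pv_join_append, pv_join_cons, pv_join_nil, String.append_assoc]
    rw [← String.append_assoc, ← String.ofList_append]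
    rfl

-- ===== VERDICT (by name: the statement is the Claim_ definition above) =====
theorem salt_password_spec : Claim_equal_salt_password := by
  intro password _
  unfold Spec_salt_password salt_password salt_password_alt
  show String.join (password.toList.foldl _ ((0:Int), ([]:List String))).2 = _
  rw [salt_foldl_eq password.toList 0 [] (by decide)]
  simp [pv_join_nil]
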